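-- pv_equiv track=rewrite | github.com/pabloalvarez99/JAVA | STUDY/SOLUCIONES/PYTHON/06_Modulos_CLI/ejercicios_extra_solucion.py | normalize_flags
-- ===== SOURCE A (Python) =====
-- def normalize_flags(flags):
--     """Normaliza flags a minusculas sin duplicados."""
--     seen = set()
--     out = []
--     for flag in flags:
--         key = flag.strip().lower()
--         if key and key not in seen:
--             seen.add(key)
--             out.append(key)
--     return out
-- ===== SOURCE B (Python) =====
-- def normalize_flags(flags):
--     """Normaliza flags a minusculas sin duplicados."""
--     first = {}
--     for i, flag in enumerate(flags):
--         key = flag.strip().lower()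
--         if key:
--             first[key] = min(first.get(key, i), i)
--     return sorted(first, key=first.get)
-- ===== Notes on version B (the rewrite author's own statement) =====
-- stated objective: alternative
-- what changed: B replaces A's streaming seen-set accumulator by a group-then-sort algorithm: one pass records each normalized key's minimal (first) occurrence index in a dict, and the result is the keys sorted by that first index, so no ordered output list is maintained during the scan.
import Mathlib
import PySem

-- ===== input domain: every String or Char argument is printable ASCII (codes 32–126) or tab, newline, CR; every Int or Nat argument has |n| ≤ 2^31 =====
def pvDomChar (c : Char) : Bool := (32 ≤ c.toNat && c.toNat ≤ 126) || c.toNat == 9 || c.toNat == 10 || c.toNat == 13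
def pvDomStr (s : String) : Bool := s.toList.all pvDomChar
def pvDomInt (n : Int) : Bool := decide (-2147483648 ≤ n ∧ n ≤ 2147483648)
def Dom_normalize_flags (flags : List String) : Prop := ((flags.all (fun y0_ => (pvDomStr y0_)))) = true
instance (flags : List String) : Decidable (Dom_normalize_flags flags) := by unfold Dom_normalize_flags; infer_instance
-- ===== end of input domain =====

-- B replaces A's seen-set + ordered accumulator with a group-then-sort algorithm: one pass
-- records each normalized key's minimal (first) index in a dict, then sorts the keys by that index.


-- ===== PORT A =====
def normalize_flags (flags : List String) : List String :=
  (flags.foldl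
    (fun (st : PySem.Set String × List String) flag =>
      let key := PySem.Str.lower (PySem.Str.strip flag)
      if key.toList ≠ [] ∧ key ∉ st.1 then
        (st.1.add key, st.2 ++ [key])
      else st)
    (PySem.Set.empty, [])).2

-- ===== PORT B =====
def normalize_flags_alt (flags : List String) : List String :=
  let first := (PySem.List.enumerate flags).foldl
    (fun (d : PySem.Dict String Int) p =>
      let key := PySem.Str.lower (PySem.Str.strip p.2)
      if key.toList = [] then d
      else d.insert key (min (d.getD key p.1) p.1))
    PySem.Dict.empty
  -- sorted(first, key=first.get): every key of `first` is present, so first.get k = first.getD k 0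
  PySem.List.sorted first.keys (fun k => first.getD k 0) false

-- ===== PRECONDITION & SPEC =====
def Spec_normalize_flags (flags : List String) (out : List String) : Prop := out = normalize_flags_alt flags
instance (flags : List String) (out : List String) : Decidable (Spec_normalize_flags flags out) := by unfold Spec_normalize_flags; infer_instance

-- ===== CLAIM (what is proved, stated in full; the proofs are below) =====
def Claim_equal_normalize_flags : Prop := ∀ (flags : List String), Dom_normalize_flags flags → Spec_normalize_flags flags (normalize_flags flags)

-- ===== LEMMAS AND PROOFS =====

-- the common reference value: ordered dedup of the non-empty normalized keys
def nfAcc (acc : List String) (f : String) : List String :=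
  let k := PySem.Str.lower (PySem.Str.strip f)
  if k.toList ≠ [] ∧ k ∉ acc then acc ++ [k] else acc

-- A's diagonal invariant: seen = out, and the pair fold is the plain accumulator fold
theorem nf_A_fold (ks : List String) (s : List String) :
    (ks.foldl
      (fun (st : PySem.Set String × List String) flag =>
        let key := PySem.Str.lower (PySem.Str.strip flag)
        if key.toList ≠ [] ∧ key ∉ st.1 then
          (st.1.add key, st.2 ++ [key])
        else st)
      (s, s)).2 = ks.foldl nfAcc s := by
  induction ks generalizing s with
  | nil => simp
  | cons f ks ih =>
    simp only [List.foldl_cons, nfAcc]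
    split_ifs with c
    · have hadd : PySem.Set.add s (PySem.Str.lower (PySem.Str.strip f))
          = s ++ [PySem.Str.lower (PySem.Str.strip f)] := by
        simp [PySem.Set.add, PySem.Set.contains, c.2]
      rw [hadd]; exact ih _
    · exact ih s

-- B's invariant: folding the indexed scan onto a dict with distinct keys whose values are
-- all < s keeps the keys equal to the accumulator fold, keys distinct, values < s + length,
-- and the item values strictly increasing.
theorem nf_B_fold (flags : List String) : ∀ (s : Int) (d : PySem.Dict String Int),
    d.keys.Nodup → (∀ p ∈ d.items, p.2 < s) → d.items.Pairwise (fun p q => p.2 < q.2) →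
    ((PySem.List.enumerate flags s).foldl
        (fun (d : PySem.Dict String Int) p =>
          let key := PySem.Str.lower (PySem.Str.strip p.2)
          if key.toList = [] then d
          else d.insert key (min (d.getD key p.1) p.1)) d).keys
      = flags.foldl nfAcc d.keys
    ∧ ((PySem.List.enumerate flags s).foldl
        (fun (d : PySem.Dict String Int) p =>
          let key := PySem.Str.lower (PySem.Str.strip p.2)
          if key.toList = [] then d
          else d.insert key (min (d.getD key p.1) p.1)) d).keys.Nodup
    ∧ (∀ p ∈ ((PySem.List.enumerate flags s).foldl
        (fun (d : PySem.Dict String Int) p =>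
          let key := PySem.Str.lower (PySem.Str.strip p.2)
          if key.toList = [] then d
          else d.insert key (min (d.getD key p.1) p.1)) d).items, p.2 < s + flags.length)
    ∧ ((PySem.List.enumerate flags s).foldl
        (fun (d : PySem.Dict String Int) p =>
          let key := PySem.Str.lower (PySem.Str.strip p.2)
          if key.toList = [] then d
          else d.insert key (min (d.getD key p.1) p.1)) d).items.Pairwise (fun p q => p.2 < q.2) := by
  induction flags with
  | nil =>
    intro s d hnd hlt hpw
    simp only [PySem.List.enumerate_nil, List.foldl_nil, List.length_nil, Nat.cast_zero, add_zero]
    exact ⟨trivial, hnd, hlt, hpw⟩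
  | cons f t ih =>
    intro s d hnd hlt hpw
    rw [PySem.List.enumerate_cons]
    simp only [List.foldl_cons, List.length_cons]
    set k := PySem.Str.lower (PySem.Str.strip f) with hk
    by_cases hke : k.toList = []
    · -- empty key: both sides skip
      have hstep : (if k.toList = [] then d else d.insert k (min (d.getD k s) s)) = d := by
        simp [hke]
      rw [hstep]
      have hacc : nfAcc d.keys f = d.keys := by
        simp [nfAcc, ← hk, hke]
      rw [hacc]
      have := ih (s + 1) d hnd (fun p hp => lt_trans (hlt p hp) (by omega)) hpw
      refine ⟨this.1, this.2.1, fun p hp => ?_, this.2.2.2⟩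
      have := this.2.2.1 p hp
      push_cast at this ⊢
      omega
    · by_cases hc : d.contains k = true
      · -- key already present: the insert rewrites the existing entry with its own value
        obtain ⟨v, hv⟩ : ∃ v, d.get? k = some v := by
          cases hg : d.get? k with
          | none => rw [PySem.Dict.get?_eq_none_iff_contains] at hg; simp [hg] at hc
          | some v => exact ⟨v, rfl⟩
        have hmem : (k, v) ∈ d.items := PySem.Dict.mem_items_of_get?_eq_some d hv
        have hvlt : v < s := hlt _ hmem
        have hgetD : d.getD k s = v := PySem.Dict.getD_of_get?_eq_some d s hv
        have hmin : min (d.getD k s) s = v := by rw [hgetD]; exact min_eq_left (le_of_lt hvlt)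
        have hins : d.insert k (min (d.getD k s) s) = d := by
          apply PySem.Dict.ext
          rw [hmin, PySem.Dict.items_insert_of_contains d v hc]
          have hmap : ∀ p ∈ d.items,
              (fun p : String × Int => if (p.1 == k) = true then (k, v) else p) p = id p := by
            intro p hp
            obtain ⟨a, bv⟩ := p
            by_cases hpk : a = k
            · have h1 : d.get? a = some bv := PySem.Dict.get?_of_mem_items d hp hnd
              rw [hpk, hv] at h1
              have : bv = v := by injection h1.symm
              simp [hpk, this]
            · simp [hpk]
          rw [List.map_congr_left hmap, List.map_id]
        have hstep : (if k.toList = [] then d else d.insert k (min (d.getD k s) s)) = d := by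
          rw [if_neg hke, hins]
        rw [hstep]
        have hkmem : k ∈ d.keys := (PySem.Dict.contains_iff_mem_keys d k).mp hc
        have hacc : nfAcc d.keys f = d.keys := by
          simp [nfAcc, ← hk, hkmem]
        rw [hacc]
        have := ih (s + 1) d hnd (fun p hp => lt_trans (hlt p hp) (by omega)) hpw
        refine ⟨this.1, this.2.1, fun p hp => ?_, this.2.2.2⟩
        have := this.2.2.1 p hp
        push_cast at this ⊢
        omega
      · -- fresh key: appended with its index s
        have hc' : d.contains k = false := by simpa using hc
        have hgetD : d.getD k s = s := PySem.Dict.getD_of_not_contains d s hc'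
        have hmin : min (d.getD k s) s = s := by rw [hgetD]; exact min_self s
        have hstep : (if k.toList = [] then d else d.insert k (min (d.getD k s) s)) = d.insert k s := by
          rw [if_neg hke, hmin]
        rw [hstep]
        have hknmem : k ∉ d.keys := fun h => by
          rw [(PySem.Dict.contains_iff_mem_keys d k).mpr h] at hc'; exact absurd hc' (by simp)
        have hkeys : (d.insert k s).keys = d.keys ++ [k] :=
          PySem.Dict.keys_insert_of_not_contains d s hc'
        have hitems : (d.insert k s).items = d.items ++ [(k, s)] :=
          PySem.Dict.items_insert_of_not_contains d s hc'
        have hnd' : (d.insert k s).keys.Nodup := by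
          rw [hkeys]
          exact List.Nodup.append hnd (List.nodup_singleton k)
            (by intro a ha hb; rw [List.mem_singleton] at hb; subst hb; exact hknmem ha)
        have hlt' : ∀ p ∈ (d.insert k s).items, p.2 < s + 1 := by
          intro p hp
          rw [hitems] at hp
          rcases List.mem_append.mp hp with h | h
          · exact lt_trans (hlt p h) (by omega)
          · simp only [List.mem_singleton] at h
            subst h
            exact lt_add_one s
        have hpw' : (d.insert k s).items.Pairwise (fun p q => p.2 < q.2) := by
          rw [hitems]
          apply List.pairwise_append.mpr
          refine ⟨hpw, by simp, ?_⟩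
          intro a ha b hb
          simp at hb
          rw [hb]
          exact hlt a ha
        have hacc : nfAcc d.keys f = d.keys ++ [k] := by
          simp [nfAcc, ← hk, hke, hknmem]
        rw [hacc]
        have := ih (s + 1) (d.insert k s) hnd' hlt' hpw'
        rw [hkeys] at this
        refine ⟨this.1, this.2.1, fun p hp => ?_, this.2.2.2⟩
        have := this.2.2.1 p hp
        push_cast at this ⊢
        omega

-- ===== VERDICT (by name: the statement is the Claim_ definition above) =====
theorem normalize_flags_spec : Claim_equal_normalize_flags := by
  intro flags _
  unfold Spec_normalize_flags normalize_flags normalize_flags_alt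
  have h0 := nf_B_fold flags 0 PySem.Dict.empty (by simp)
    (by intro p hp; simp [PySem.Dict.empty] at hp)
    (by simp [PySem.Dict.empty])
  set first := (PySem.List.enumerate flags).foldl
    (fun (d : PySem.Dict String Int) p =>
      let key := PySem.Str.lower (PySem.Str.strip p.2)
      if key.toList = [] then d
      else d.insert key (min (d.getD key p.1) p.1)) PySem.Dict.empty with hfirst
  obtain ⟨hkeys, hnd, -, hpw⟩ := h0
  show _ = PySem.List.sorted first.keys (fun k => first.getD k 0) false
  -- the keys come out in strictly increasing first-index order, so the sort is the identity
  have hkeyspw : first.keys.Pairwise (fun a b => first.getD a 0 ≤ first.getD b 0) := by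
    have hitems := PySem.Dict.items_eq_map_keys first hnd 0
    rw [hitems] at hpw
    rw [List.pairwise_map] at hpw
    exact hpw.imp (fun h => le_of_lt h)
  have h1 : PySem.List.sorted first.keys (fun k => first.getD k 0) false = first.keys :=
    PySem.List.sorted_eq_self_of_pairwise first.keys (fun k => first.getD k 0) hkeyspw
  have h2 : first.keys = flags.foldl nfAcc [] := by
    rw [hkeys]; simp [PySem.Dict.keys_empty]
  exact (nf_A_fold flags []).trans (h1.trans h2).symm
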